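-- pv_equiv track=rewrite | github.com/hirosuzuki/procon | atcoder/agc023/b.py | solve
-- ===== SOURCE A (Python) =====
-- def solve(N, S):
--     cs1 = [tuple(x) for x in S]
--     cs2 = list(zip(*cs1))
--     r = 0
--     for d in range(N):
--         if cs1 == cs2:
--             r += 1
--         cs1 = cs1[-1:] + cs1[:-1]
--         cs2 = [row[-1:] + row[:-1] for row in cs2]
--     return r * N
-- ===== SOURCE B (Python) =====
-- def solve(N, S):
--     # The comparison in A is periodic in the shift d with period len(S):
--     # compute which shifts within one period match, then count periods in N.
--     if N <= 0:
--         return 0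
--     m = len(S)
--     if m == 0:
--         return N * N
--     if any(len(s) != m for s in S):
--         return 0
--     good = []
--     for d in range(m):
--         ok = all(S[(i - d) % m][j] == S[(j - d) % m][i]
--                  for i in range(m) for j in range(m))
--         good.append(ok)
--     q, rem = divmod(N, m)
--     r = sum(good) * q + sum(good[:rem])
--     return r * N
-- ===== Notes on version B (the rewrite author's own statement) =====
-- stated objective: faster
-- what changed: B replaces A's loop of N rotate-and-compare steps (rebuilding both matrices each iteration) by a direct index-arithmetic symmetry check over a single period of length len(S) plus a divmod-based count of matching shifts, rejecting non-square inputs up front.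
import Mathlib
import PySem

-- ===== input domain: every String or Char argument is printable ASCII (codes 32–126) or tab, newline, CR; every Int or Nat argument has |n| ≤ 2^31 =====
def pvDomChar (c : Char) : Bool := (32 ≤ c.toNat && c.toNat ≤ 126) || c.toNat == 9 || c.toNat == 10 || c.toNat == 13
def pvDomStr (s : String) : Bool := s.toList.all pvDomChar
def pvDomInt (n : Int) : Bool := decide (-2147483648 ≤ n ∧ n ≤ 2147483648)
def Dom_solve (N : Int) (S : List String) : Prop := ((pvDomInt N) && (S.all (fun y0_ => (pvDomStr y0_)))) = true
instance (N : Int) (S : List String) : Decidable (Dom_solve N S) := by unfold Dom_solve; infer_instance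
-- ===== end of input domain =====

-- B replaces A's N-step rotate-and-compare loop by a one-period match table plus a
-- division-based count (the comparison is periodic in the shift with period len(S)).

-- ===== PORT A =====

-- xs[-1:] + xs[:-1]
def rot1 {α : Type} (xs : List α) : List α :=
  PySem.List.slice xs (some (-1)) none ++ PySem.List.slice xs none (some (-1))

-- list(zip(*cs1)): repeatedly take heads while every list is nonempty (zip of 0 lists is [])
def zipStar : List (List Char) → List (List Char)
  | [] => []
  | r :: rs =>
    if h : (r :: rs).all (fun x => !x.isEmpty) then
      ((r :: rs).map (fun x => x.headD ' ')) :: zipStar (r.tail :: rs.map List.tail)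
    else []
termination_by t => (t.headD []).length
decreasing_by
  simp_all
  cases r with
  | nil => exact absurd rfl h.1
  | cons a t => simp

-- the 'for d in range(N)' loop with state (cs1, cs2, r)
def solveLoop : Nat → List (List Char) → List (List Char) → Int → Int
  | 0, _, _, r => r
  | n + 1, cs1, cs2, r =>
      solveLoop n (rot1 cs1) (cs2.map rot1) (if cs1 == cs2 then r + 1 else r)

def solve (N : Int) (S : List String) : Int :=
  let cs1 := S.map String.toList
  let cs2 := zipStar cs1
  (solveLoop N.toNat cs1 cs2 0) * N

-- ===== PORT B =====

-- all(S[(i-d)%m][j] == S[(j-d)%m][i] for i in range(m) for j in range(m))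
def goodAt (S : List String) (m : Nat) (d : Nat) : Bool :=
  (List.range m).all fun i => (List.range m).all fun j =>
    PySem.Str.pyGet? (S.getD ((PySem.Int.mod ((i : Int) - (d : Int)) (m : Int)).toNat) "") ((j : Int))
      == PySem.Str.pyGet? (S.getD ((PySem.Int.mod ((j : Int) - (d : Int)) (m : Int)).toNat) "") ((i : Int))

def solve_alt (N : Int) (S : List String) : Int :=
  if N ≤ 0 then 0
  else
    let m := S.length
    if m = 0 then N * N
    else if S.any (fun s => PySem.Str.len s ≠ (m : Int)) then 0
    else
      let good := (List.range m).map (fun d => goodAt S m d)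
      let q := PySem.Int.floordiv N (m : Int)
      let rem := PySem.Int.mod N (m : Int)
      (((good.count true : Nat) : Int) * q + (((good.take rem.toNat).count true : Nat) : Int)) * N

-- ===== PRECONDITION & SPEC =====
def Spec_solve (N : Int) (S : List String) (out : Int) : Prop := out = solve_alt N S
instance (N : Int) (S : List String) (out : Int) : Decidable (Spec_solve N S out) := by unfold Spec_solve; infer_instance

-- ===== CLAIM (what is proved, stated in full; the proofs are below) =====
def Claim_equal_solve : Prop := ∀ (N : Int) (S : List String), Dom_solve N S → Spec_solve N S (solve N S)

-- ===== LEMMAS AND PROOFS =====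

theorem rot1_eq_rotate {α : Type} (xs : List α) : rot1 xs = xs.rotate (xs.length - 1) := by
  rw [rot1, PySem.List.slice_from_neg_one, PySem.List.slice_to_neg_one,
    List.rotate_eq_drop_append_take (by omega), List.dropLast_eq_take]

theorem rot1_iterate {α : Type} (xs : List α) (d : Nat) :
    rot1^[d] xs = xs.rotate (d * (xs.length - 1)) := by
  induction d with
  | zero => simp
  | succ n ih =>
    rw [Function.iterate_succ_apply', ih, rot1_eq_rotate, List.length_rotate,
      List.rotate_rotate]
    ring_nf

theorem zipStar_row_length (T : List (List Char)) :
    ∀ row ∈ zipStar T, row.length = T.length := by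
  induction T using zipStar.induct with
  | case1 => simp [zipStar]
  | case2 r rs h ih =>
    simp only [List.map_subtype, List.unattach_attach] at ih
    rw [zipStar, dif_pos h]
    intro row hrow
    rcases List.mem_cons.mp hrow with h1 | h2
    · subst h1; simp only [List.length_map]
    · have := ih row h2
      simp only [List.length_cons, List.length_map] at this ⊢
      omega
  | case3 r rs h =>
    intro row hrow
    rw [zipStar, dif_neg h] at hrow
    simp at hrow

theorem zipStar_length_le (T : List (List Char)) :
    ∀ r ∈ T, (zipStar T).length ≤ r.length := by
  induction T using zipStar.induct with
  | case1 => simp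
  | case2 r rs h ih =>
    simp only [List.map_subtype, List.unattach_attach] at ih
    rw [zipStar, dif_pos h]
    intro x hx
    have hx' : x.tail ∈ r.tail :: rs.map List.tail := by
      rcases List.mem_cons.mp hx with h1 | h2
      · rw [h1]; exact List.mem_cons_self
      · exact List.mem_cons_of_mem _ (List.mem_map_of_mem h2)
    have hle := ih x.tail hx'
    have hne : x ≠ [] := by
      have := List.all_eq_true.mp h x hx
      simpa using this
    have hlt : x.tail.length = x.length - 1 := by simp [List.length_tail]
    have hx0 : 0 < x.length := List.length_pos_iff.mpr hne
    simp only [List.length_cons]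
    omega
  | case3 r rs h =>
    intro x hx
    rw [zipStar, dif_neg h]
    simp

theorem zipStar_square (L : Nat) (T : List (List Char)) (hT : T ≠ [])
    (h : ∀ r ∈ T, r.length = L) :
    zipStar T = (List.range L).map (fun i => T.map (fun r => r.getD i ' ')) := by
  induction L generalizing T with
  | zero =>
    cases T with
    | nil => exact absurd rfl hT
    | cons r rs =>
      have hre : r = [] := List.eq_nil_of_length_eq_zero (h r (by simp))
      rw [zipStar, dif_neg (by simp [hre])]
      simp
  | succ L ih =>
    cases T with
    | nil => exact absurd rfl hT
    | cons r rs =>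
      have hall : (r :: rs).all (fun x => !x.isEmpty) = true := by
        rw [List.all_eq_true]
        intro x hx
        have := h x hx
        cases x with
        | nil => simp at this
        | cons a t => simp
      rw [zipStar, dif_pos hall]
      have htails : r.tail :: rs.map List.tail = (r :: rs).map List.tail := by simp
      rw [htails, ih ((r :: rs).map List.tail) (by simp)
        (by intro x hx; rcases List.mem_map.mp hx with ⟨y, hy, rfl⟩
            have := h y hy; simp [List.length_tail, this])]
      rw [List.range_succ_eq_map]
      simp only [List.map_cons, List.map_map]
      congr 1
      · congr 1
        · cases r with
          | nil => exact absurd (h [] (by simp)) (by simp)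
          | cons a t => rfl
        · apply List.map_congr_left
          intro x hx
          have hne : x ≠ [] := by
            have := List.all_eq_true.mp hall x (List.mem_cons_of_mem _ hx); simpa using this
          cases x with
          | nil => exact absurd rfl hne
          | cons a t => rfl
      · apply List.map_congr_left
        intro i _
        simp only [Function.comp]
        congr 1
        · cases r <;> rfl
        · apply List.map_congr_left
          intro x _
          cases x <;> rfl

theorem solveLoop_eq (n : Nat) (cs1 cs2 : List (List Char)) (r : Int) :
    solveLoop n cs1 cs2 r =
      r + ((List.range n).countP (fun d => rot1^[d] cs1 == cs2.map (rot1^[d]))) := by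
  induction n generalizing cs1 cs2 r with
  | zero => simp [solveLoop]
  | succ n ih =>
    rw [solveLoop, ih, List.range_succ_eq_map]
    rw [List.countP_cons, List.countP_map]
    have hmap : ∀ d : Nat, (cs2.map rot1).map (rot1^[d]) = cs2.map (rot1^[d+1]) := by
      intro d
      rw [List.map_map]
      apply List.map_congr_left
      intro x _
      simp [Function.comp, Function.iterate_succ_apply]
    have hcongr : (List.range n).countP ((fun d => rot1^[d] cs1 == cs2.map rot1^[d]) ∘ Nat.succ)
        = (List.range n).countP (fun d => rot1^[d] (rot1 cs1) == (cs2.map rot1).map rot1^[d]) := by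
      apply List.countP_congr
      intro d _
      simp only [Function.comp, Function.iterate_succ_apply, hmap]
    rw [hcongr]
    simp only [Function.iterate_zero, id_eq, List.map_id]
    by_cases hc : (cs1 == cs2) = true
    · rw [if_pos hc, if_pos hc]
      push_cast
      ring
    · rw [if_neg hc, if_neg hc]
      push_cast
      ring

theorem countP_range_period (f : Nat → Bool) (m : Nat) (hm : 0 < m) (n : Nat) :
    (List.range n).countP (fun d => f (d % m)) =
      n / m * (List.range m).countP f + (List.range (n % m)).countP f := by
  induction n using Nat.strong_induction_on with
  | _ n ih =>
    by_cases hn : n < m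
    · rw [Nat.div_eq_of_lt hn, Nat.mod_eq_of_lt hn]
      simp only [Nat.zero_mul, Nat.zero_add]
      apply List.countP_congr
      intro d hd
      have : d < m := lt_of_lt_of_le (List.mem_range.mp hd) (le_of_lt hn)
      rw [Nat.mod_eq_of_lt this]
    · push_neg at hn
      have hsplit : n = m + (n - m) := by omega
      rw [hsplit, List.range_add, List.countP_append, List.countP_map]
      have h1 : (List.range m).countP (fun d => f (d % m)) = (List.range m).countP f := by
        apply List.countP_congr
        intro d hd
        rw [Nat.mod_eq_of_lt (List.mem_range.mp hd)]
      have h2 : (List.range (n - m)).countP ((fun d => f (d % m)) ∘ (m + ·))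
          = (List.range (n - m)).countP (fun d => f (d % m)) := by
        apply List.countP_congr
        intro d _
        simp [Function.comp, Nat.add_mod_left]
      rw [h1, h2, ih (n - m) (by omega)]
      have hd1 : (m + (n - m)) / m = (n - m) / m + 1 := by
        rw [Nat.add_comm, Nat.add_div_right _ hm]
      have hd2 : (m + (n - m)) % m = (n - m) % m := by
        rw [Nat.add_comm, Nat.add_mod_right]
      rw [hd1, hd2]
      ring

theorem list_eq_iff_getD {α : Type} (n : Nat) (d0 : α) (l1 l2 : List α)
    (h1 : l1.length = n) (h2 : l2.length = n) :
    l1 = l2 ↔ ∀ k, k < n → l1.getD k d0 = l2.getD k d0 := by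
  constructor
  · intro h k _; rw [h]
  · intro h
    apply List.ext_getElem (by omega)
    intro k hk1 hk2
    have hk := h k (by omega)
    rwa [List.getD_eq_getElem _ _ hk1, List.getD_eq_getElem _ _ hk2] at hk

theorem rotate_getD {α : Type} (l : List α) (e k : Nat) (d0 : α) (hk : k < l.length) :
    (l.rotate e).getD k d0 = l.getD ((k + e) % l.length) d0 := by
  have hk' : k < (l.rotate e).length := by simpa using hk
  have hmod : (k + e) % l.length < l.length := Nat.mod_lt _ (by omega)
  rw [List.getD_eq_getElem _ _ hk', List.getD_eq_getElem _ _ hmod]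
  exact List.getElem_rotate l e k hk'

theorem idx_eq (m i d : Nat) (hm : 0 < m) :
    (((i : Int) - (d : Int)) % (m : Int)).toNat = (i + d * (m - 1)) % m := by
  have key : ((i : Int) - (d : Int)) % (m : Int)
      = (((i + d * (m - 1)) % m : Nat) : Int) := by
    have hm1 : ((m - 1 : Nat) : Int) = (m : Int) - 1 := by
      push_cast [Nat.cast_sub (by omega : 1 ≤ m)]; ring
    push_cast [hm1]
    have h1 : (i : Int) + (d : Int) * ((m : Int) - 1) = ((i : Int) - d) + (m : Int) * d := by ring
    rw [h1, Int.add_mul_emod_self_left]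
  rw [key, Int.toNat_natCast]

theorem shift_mod (m k d : Nat) : (k + d * (m - 1)) % m = (k + d % m * (m - 1)) % m :=
  (((Nat.mod_modEq d m).mul_right (m - 1)).add_left k).symm

-- the comparison A makes at step d, for a square S, is exactly B's table entry at d % m
theorem bridge (S : List String) (m : Nat) (hm : 0 < m) (hmS : S.length = m)
    (hsq : ∀ s ∈ S, s.toList.length = m) (d : Nat) :
    (rot1^[d] (S.map String.toList) == (zipStar (S.map String.toList)).map (rot1^[d]))
      = goodAt S m (d % m) := by
  set T := S.map String.toList with hT
  have hTlen : T.length = m := by simp [hT, hmS]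
  have hrows : ∀ r ∈ T, r.length = m := by
    intro r hr
    rcases List.mem_map.mp hr with ⟨s, hs, rfl⟩
    exact hsq s hs
  have hTne : T ≠ [] := by
    intro h; rw [h] at hTlen; simp at hTlen; omega
  have hgetT : ∀ idx, idx < m → (T.getD idx []).length = m := by
    intro idx hidx
    rw [List.getD_eq_getElem _ _ (by omega)]
    exact hrows _ (List.getElem_mem _)
  have hgetS : ∀ idx, idx < m → (S.getD idx "").toList = T.getD idx [] := by
    intro idx hidx
    rw [hT]
    rw [List.getD_eq_getElem S _ (by omega : idx < S.length),
      List.getD_eq_getElem _ _ (by simpa using (by omega : idx < S.length)),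
      List.getElem_map]
  have hZ := zipStar_square m T hTne hrows
  have hrotT : rot1^[d] T = T.rotate (d * (m - 1)) := by rw [rot1_iterate, hTlen]
  have hmap2 : (zipStar T).map (rot1^[d])
      = (List.range m).map (fun i => (T.map (fun r => r.getD i ' ')).rotate (d * (m - 1))) := by
    rw [hZ, List.map_map]
    apply List.map_congr_left
    intro i _
    simp only [Function.comp]
    rw [rot1_iterate, List.length_map, hTlen]
  rw [Bool.eq_iff_iff, beq_iff_eq, hrotT, hmap2]
  have hQA : (T.rotate (d * (m - 1)) = (List.range m).map
        (fun i => (T.map (fun r => r.getD i ' ')).rotate (d * (m - 1))))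
      ↔ (∀ i, i < m → ∀ j, j < m →
          (T.getD ((i + d * (m - 1)) % m) []).getD j ' '
            = (T.getD ((j + d * (m - 1)) % m) []).getD i ' ') := by
    rw [list_eq_iff_getD m [] _ _ (by simp [hTlen]) (by simp)]
    apply forall_congr'
    intro k
    apply imp_congr_right
    intro hk
    have hmapgetD : ∀ x, x < m →
        (T.map (fun r => r.getD k ' ')).getD x ' ' = (T.getD x []).getD k ' ' := by
      intro x hx
      rw [List.getD_eq_getElem _ _ (by simpa [hTlen] using hx), List.getElem_map,
        List.getD_eq_getElem T _ (by omega)]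
    rw [show (List.map (fun i => (List.map (fun r => r.getD i ' ') T).rotate (d * (m - 1)))
        (List.range m)).getD k []
      = (List.map (fun r => r.getD k ' ') T).rotate (d * (m - 1)) from by
        rw [List.getD_eq_getElem _ _ (by simpa using hk), List.getElem_map, List.getElem_range]]
    rw [rotate_getD T _ k [] (by omega), hTlen]
    rw [list_eq_iff_getD m ' ' _ _ (hgetT _ (Nat.mod_lt _ (by omega))) (by simp [hTlen])]
    apply forall_congr'
    intro j
    apply imp_congr_right
    intro hj
    rw [rotate_getD (T.map (fun r => r.getD k ' ')) _ j ' ' (by simp [hTlen]; omega),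
      List.length_map, hTlen, hmapgetD _ (Nat.mod_lt _ (by omega))]
  rw [hQA]
  -- now the B side
  rw [goodAt]
  simp only [List.all_eq_true, List.mem_range]
  have hm' : (0 : Int) < (m : Int) := by exact_mod_cast hm
  apply forall_congr'
  intro i
  apply imp_congr_right
  intro hi
  apply forall_congr'
  intro j
  apply imp_congr_right
  intro hj
  simp only [PySem.Int.mod_eq_emod_of_pos hm']
  rw [idx_eq m i (d % m) hm, idx_eq m j (d % m) hm, ← shift_mod m i d, ← shift_mod m j d]
  simp only [PySem.Str.pyGet?_natCast]
  rw [hgetS _ (Nat.mod_lt _ (by omega)), hgetS _ (Nat.mod_lt _ (by omega))]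
  have hopt : ∀ (l : List Char) (x : Nat), x < l.length → l[x]? = some (l.getD x ' ') := by
    intro l x hx
    rw [List.getElem?_eq_getElem hx, List.getD_eq_getElem _ _ hx]
  rw [hopt _ _ (by rw [hgetT _ (Nat.mod_lt _ (by omega))]; omega),
    hopt _ _ (by rw [hgetT _ (Nat.mod_lt _ (by omega))]; omega)]
  simp

-- for a non-square S the comparison is never true
theorem nonsquare_never (S : List String) (m : Nat) (hm : 0 < m) (hmS : S.length = m)
    (hns : ∃ s ∈ S, s.toList.length ≠ m) (d : Nat) :
    (rot1^[d] (S.map String.toList) == (zipStar (S.map String.toList)).map (rot1^[d]))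
      = false := by
  set T := S.map String.toList with hT
  have hTlen : T.length = m := by simp [hT, hmS]
  rw [beq_eq_false_iff_ne]
  intro heq
  rcases hns with ⟨s, hs, hsl⟩
  have hxT : s.toList ∈ T := by rw [hT]; exact List.mem_map_of_mem hs
  have hZrow := zipStar_row_length T
  have hZle := zipStar_length_le T s.toList hxT
  have hlen1 : (rot1^[d] T).length = m := by
    rw [rot1_iterate, List.length_rotate, hTlen]
  have hlen2 : ((zipStar T).map (rot1^[d])).length = (zipStar T).length := by simp
  by_cases hZm : (zipStar T).length = m
  · -- the long row argument
    have hge : m ≤ s.toList.length := by omega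
    have hgt : m < s.toList.length := by omega
    have hmem : s.toList ∈ rot1^[d] T := by
      rw [rot1_iterate]
      exact (List.mem_rotate).mpr hxT
    rw [heq] at hmem
    rcases List.mem_map.mp hmem with ⟨z, hz, hzeq⟩
    have : z.length = m := by
      have := hZrow z hz; omega
    have : s.toList.length = m := by
      rw [← hzeq, rot1_iterate, List.length_rotate]
      exact this
    omega
  · have := congrArg List.length heq
    rw [hlen1, hlen2] at this
    exact hZm this.symm

theorem count_true_map {α : Type} (l : List α) (f : α → Bool) :
    (l.map f).count true = l.countP f := by
  induction l with
  | nil => rfl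
  | cons x xs ih => simp [List.count_cons, List.countP_cons, ih]

-- ===== VERDICT (by name: the statement is the Claim_ definition above) =====
theorem solve_spec : Claim_equal_solve := by
  intro N S _
  show solve N S = solve_alt N S
  by_cases hN : N ≤ 0
  · have h0 : N.toNat = 0 := by omega
    simp [solve, solve_alt, h0, hN, solveLoop]
  · obtain ⟨n, rfl⟩ := Int.eq_ofNat_of_zero_le (by omega : (0 : Int) ≤ N)
    have hn0 : 0 < n := by omega
    have htn : ((n : Int)).toNat = n := Int.toNat_natCast n
    by_cases hm0 : S.length = 0
    · have hSnil : S = [] := List.length_eq_zero_iff.mp hm0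
      subst hSnil
      rw [solve, solve_alt, if_neg hN]
      rw [show (([] : List String).map String.toList) = [] from rfl]
      rw [show zipStar [] = [] from by rw [zipStar]]
      rw [solveLoop_eq]
      have hc : (List.range ((n : Int)).toNat).countP
          (fun d => rot1^[d] ([] : List (List Char)) == ([] : List (List Char)).map (rot1^[d]))
          = (List.range ((n : Int)).toNat).countP (fun _ => true) :=
        List.countP_congr (by intro d _; simp [rot1_iterate])
      rw [hc, List.countP_true, List.length_range, htn]
      simp
    · have hm : 0 < S.length := by omega
      by_cases hsq : ∀ s ∈ S, s.toList.length = S.length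
      · -- square case
        have hany : (S.any fun s => decide (PySem.Str.len s ≠ (S.length : Int))) = false := by
          rw [List.any_eq_false]
          intro s hs
          simp [PySem.Str.len_eq, hsq s hs]
        rw [solve, solveLoop_eq]
        have hbr : (List.range ((n : Int)).toNat).countP
            (fun d => rot1^[d] (S.map String.toList) == (zipStar (S.map String.toList)).map (rot1^[d]))
            = (List.range ((n : Int)).toNat).countP (fun d => goodAt S S.length (d % S.length)) :=
          List.countP_congr (by intro d _; rw [bridge S S.length hm rfl hsq d])
        rw [hbr, htn, countP_range_period _ _ hm n]
        rw [solve_alt, if_neg hN, if_neg hm0]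
        rw [if_neg (show ¬ ((S.any fun s => decide (PySem.Str.len s ≠ (S.length : Int))) = true) from by
          rw [hany]; simp)]
        simp only [count_true_map, PySem.Int.floordiv_natCast, PySem.Int.mod_natCast,
          Int.toNat_natCast, ← List.map_take, List.take_range]
        rw [Nat.min_eq_left (le_of_lt (Nat.mod_lt _ hm))]
        push_cast
        ring
      · -- non-square case
        have hex : ∃ s ∈ S, s.toList.length ≠ S.length := by
          push_neg at hsq; exact hsq
        have hany : (S.any fun s => decide (PySem.Str.len s ≠ (S.length : Int))) = true := by
          rcases hex with ⟨s, hs, hsl⟩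
          rw [List.any_eq_true]
          refine ⟨s, hs, ?_⟩
          simp [PySem.Str.len_eq]
          exact_mod_cast hsl
        rw [solve, solveLoop_eq]
        have hz : (List.range ((n : Int)).toNat).countP
            (fun d => rot1^[d] (S.map String.toList) == (zipStar (S.map String.toList)).map (rot1^[d]))
            = 0 :=
          List.countP_eq_zero.mpr (by
            intro a _
            simp [nonsquare_never S S.length hm rfl hex a])
        rw [hz, solve_alt, if_neg hN, if_neg hm0]
        rw [if_pos (show ((S.any fun s => decide (PySem.Str.len s ≠ (S.length : Int))) = true) from hany)]
        simp
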